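-- pv_equiv track=rewrite | github.com/fbaumdicker/goldfinder | goldfinder/tree_reconstruction.py | get_children_indices
-- ===== SOURCE A (Python) =====
-- def get_children_indices(tree_struc, node_index):
--     """Finding indices of all children of a node
--     tree_struc: tree list of lists data structure
--     node_index: current index of node
--     return: indices of children of node
--     """
--     c_ind = []
--
--     if tree_struc[node_index][1] == 0:
--         pass
--         # c_ind.append(node_index)
--     else:
--         c_ind.append(tree_struc[node_index][1])
--         c_ind.extend(get_children_indices(tree_struc, tree_struc[node_index][1]))
--
--         c_ind.append(tree_struc[node_index][2])
--         c_ind.extend(get_children_indices(tree_struc, tree_struc[node_index][2]))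
--     return c_ind
-- ===== SOURCE B (Python) =====
-- def get_children_indices(tree_struc, node_index):
--     """Iterative preorder traversal with an explicit stack instead of recursion."""
--     c_ind = []
--     stack = [node_index]
--     skip_root = True
--     while stack:
--         n = stack.pop()
--         if skip_root:
--             skip_root = False
--         else:
--             c_ind.append(n)
--         if tree_struc[n][1] != 0:
--             stack.append(tree_struc[n][2])
--             stack.append(tree_struc[n][1])
--     return c_ind
-- ===== Notes on version B (the rewrite author's own statement) =====
-- stated objective: alternative
-- what changed: The recursive descent is replaced by an iterative preorder traversal with an explicit stack (push right child then left, skip appending the popped root), removing recursion entirely.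
import Mathlib
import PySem

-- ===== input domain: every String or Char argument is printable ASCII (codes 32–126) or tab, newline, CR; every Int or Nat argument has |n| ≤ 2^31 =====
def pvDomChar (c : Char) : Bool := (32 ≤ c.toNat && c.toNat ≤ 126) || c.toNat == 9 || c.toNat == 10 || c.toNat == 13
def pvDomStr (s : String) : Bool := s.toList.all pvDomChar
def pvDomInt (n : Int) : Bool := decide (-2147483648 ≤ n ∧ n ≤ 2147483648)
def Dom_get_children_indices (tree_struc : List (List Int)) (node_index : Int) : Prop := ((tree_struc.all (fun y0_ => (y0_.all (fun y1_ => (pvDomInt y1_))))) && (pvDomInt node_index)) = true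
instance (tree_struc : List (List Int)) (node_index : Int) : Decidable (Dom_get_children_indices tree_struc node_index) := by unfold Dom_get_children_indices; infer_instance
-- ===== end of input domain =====

-- B replaces A's recursive descent by an iterative preorder traversal with an explicit stack (pop, append unless first, push right child then left); proved equal to A on Pre_.


-- ===== PORT A =====
-- tree_struc[n] (total form; Pre_ guarantees the index is in range)
def pvRow (t : List (List Int)) (n : Int) : List Int := PySem.List.pyGetD t n []
-- tree_struc[n][k]
def pvChild (t : List (List Int)) (n k : Int) : Int := PySem.List.pyGetD (pvRow t n) k 0

-- literal port of A's recursion; the first argument is only a totality guard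
-- (under Pre_ every recursion path visits distinct rows, so t.length levels never run out)
def pvGoA (t : List (List Int)) : Nat → Int → List Int
  | 0, _ => []
  | f + 1, n =>
    if pvChild t n 1 = 0 then []
    else pvChild t n 1 :: (pvGoA t f (pvChild t n 1) ++ (pvChild t n 2 :: pvGoA t f (pvChild t n 2)))

def get_children_indices (tree_struc : List (List Int)) (node_index : Int) : List Int :=
  pvGoA tree_struc tree_struc.length node_index

-- ===== PORT B =====
-- the while-loop of Source B: pop a node, append it unless it is the first pop, push right child then left;
-- the Nat argument is only a totality guard (under Pre_ the loop performs fewer than 2^(t.length+1) pops)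
def pvLoopB (t : List (List Int)) : Nat → Bool → List Int → List Int → List Int
  | 0, _, acc, _ => acc
  | _ + 1, _, acc, [] => acc
  | f + 1, first, acc, n :: st =>
    let acc' := if first then acc else acc ++ [n]
    if pvChild t n 1 = 0 then pvLoopB t f false acc' st
    else pvLoopB t f false acc' (pvChild t n 1 :: pvChild t n 2 :: st)

def get_children_indices_alt (tree_struc : List (List Int)) (node_index : Int) : List Int :=
  pvLoopB tree_struc (2 ^ (tree_struc.length + 1)) true [] [node_index]

-- ===== PRECONDITION & SPEC =====
-- canonical (non-negative) position of Python index n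
def pvPos (t : List (List Int)) (n : Int) : Nat := if n < 0 then (n + t.length).toNat else n.toNat

-- A's recursion starting at position j returns normally within b levels: the row exists, a leaf row
-- ([_, 0, …]) has at least two entries, an internal row has at least three and both child links are
-- in Python range (-len ≤ c < len, negative indexing included), recursively.  Whenever A's recursion
-- terminates at all, its call paths visit distinct rows, so t.length levels of budget suffice.
def pvOK (t : List (List Int)) : Nat → Nat → Bool
  | 0, _ => false
  | b + 1, j =>
    match t[j]? with
    | none => false
    | some r =>
      if r.getD 1 0 = 0 then decide (2 ≤ r.length)
      else
        decide (3 ≤ r.length ∧ -(t.length : Int) ≤ r.getD 1 0 ∧ r.getD 1 0 < (t.length : Int) ∧ -(t.length : Int) ≤ r.getD 2 0 ∧ r.getD 2 0 < (t.length : Int))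
          && (pvOK t b (pvPos t (r.getD 1 0)) && pvOK t b (pvPos t (r.getD 2 0)))

-- node_index in Python range and A's walk from it returns normally.  This excludes exactly the
-- inputs where A raises: IndexError on a missing row or entry, RecursionError on cyclic links.
def Pre_get_children_indices (tree_struc : List (List Int)) (node_index : Int) : Prop :=
  (-(tree_struc.length : Int) ≤ node_index ∧ node_index < tree_struc.length) ∧
    pvOK tree_struc tree_struc.length (pvPos tree_struc node_index) = true

instance (tree_struc : List (List Int)) (node_index : Int) : Decidable (Pre_get_children_indices tree_struc node_index) := by
  unfold Pre_get_children_indices; infer_instance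

def pvWitness_get_children_indices : List (List Int) × Int := ([[0, 2, 2], [7, -1, -1], [1, 0]], 0)

def Spec_get_children_indices (tree_struc : List (List Int)) (node_index : Int) (out : List Int) : Prop := out = get_children_indices_alt tree_struc node_index
instance (tree_struc : List (List Int)) (node_index : Int) (out : List Int) : Decidable (Spec_get_children_indices tree_struc node_index out) := by unfold Spec_get_children_indices; infer_instance

-- ===== CLAIM (what is proved, stated in full; the proofs are below) =====
def Claim_equal_get_children_indices : Prop := ∀ (tree_struc : List (List Int)) (node_index : Int), Dom_get_children_indices tree_struc node_index → Pre_get_children_indices tree_struc node_index → Spec_get_children_indices tree_struc node_index (get_children_indices tree_struc node_index)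

-- ===== LEMMAS AND PROOFS =====
theorem pvPos_lt (t : List (List Int)) (n : Int) (h1 : -(t.length : Int) ≤ n) (h2 : n < t.length) :
    pvPos t n < t.length := by
  unfold pvPos; split <;> omega

theorem pvRow_eq (t : List (List Int)) (n : Int) (h1 : -(t.length : Int) ≤ n) (h2 : n < t.length) :
    pvRow t n = t[pvPos t n]'(pvPos_lt t n h1 h2) := by
  unfold pvRow pvPos
  simp only [PySem.List.pyGetD, PySem.List.pyGet?, PySem.List.pyIdx?]
  split_ifs with ha hb hc <;> simp_all <;>
    first
    | (rw [List.getElem?_eq_getElem (by omega)]; simp; congr 1; omega)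
    | omega

theorem pvChild_one (t : List (List Int)) (n : Int) (h1 : -(t.length : Int) ≤ n) (h2 : n < t.length) :
    pvChild t n 1 = (t[pvPos t n]'(pvPos_lt t n h1 h2)).getD 1 0 := by
  unfold pvChild; rw [pvRow_eq t n h1 h2]; simp [pysem]

theorem pvChild_two (t : List (List Int)) (n : Int) (h1 : -(t.length : Int) ≤ n) (h2 : n < t.length) :
    pvChild t n 2 = (t[pvPos t n]'(pvPos_lt t n h1 h2)).getD 2 0 := by
  unfold pvChild; rw [pvRow_eq t n h1 h2]; simp [pysem]

-- pvOK is monotone in its level budget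
theorem pvOK_mono (t : List (List Int)) :
    ∀ b b' j, pvOK t b j = true → b ≤ b' → pvOK t b' j = true := by
  intro b
  induction b with
  | zero => intro b' j h _; simp [pvOK] at h
  | succ b ih =>
    intro b' j h hle
    obtain ⟨b', rfl⟩ : ∃ c, b' = c + 1 := ⟨b' - 1, by omega⟩
    simp only [pvOK] at h ⊢
    cases hr : t[j]? with
    | none => rw [hr] at h; exact absurd h (by simp)
    | some r =>
      rw [hr] at h
      dsimp only at h ⊢
      split_ifs at h ⊢ with hleaf
      · exact h
      · simp only [Bool.and_eq_true] at h ⊢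
        exact ⟨h.1, ih _ _ h.2.1 (by omega), ih _ _ h.2.2 (by omega)⟩

-- one step of validity at an internal node: bounds for both children and their validity one level down
theorem pvStep (t : List (List Int)) (n : Int) (b : Nat)
    (h1 : -(t.length : Int) ≤ n) (h2 : n < t.length)
    (hv : pvOK t (b + 1) (pvPos t n) = true) (hi : pvChild t n 1 ≠ 0) :
    ((-(t.length : Int) ≤ pvChild t n 1 ∧ pvChild t n 1 < t.length ∧
      -(t.length : Int) ≤ pvChild t n 2 ∧ pvChild t n 2 < t.length)) ∧
    pvOK t b (pvPos t (pvChild t n 1)) = true ∧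
    pvOK t b (pvPos t (pvChild t n 2)) = true := by
  have hj := pvPos_lt t n h1 h2
  rw [pvChild_one t n h1 h2] at hi ⊢
  rw [pvChild_two t n h1 h2]
  simp only [pvOK, List.getElem?_eq_getElem hj, hi, ite_false, Bool.and_eq_true,
    decide_eq_true_eq] at hv
  obtain ⟨⟨hlen, hc1a, hc1b, hc2a, hc2b⟩, hv1, hv2⟩ := hv
  exact ⟨⟨hc1a, hc1b, hc2a, hc2b⟩, hv1, hv2⟩

-- fuel irrelevance for pvGoA above the pvOK budget
theorem pvGoA_mono (t : List (List Int)) :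
    ∀ b f g n, -(t.length : Int) ≤ n → n < t.length →
      pvOK t b (pvPos t n) = true → b ≤ f → b ≤ g →
      pvGoA t f n = pvGoA t g n := by
  intro b
  induction b with
  | zero => intro f g n h1 h2 hv _ _; simp [pvOK] at hv
  | succ b ih =>
    intro f g n h1 h2 hv hf hg
    obtain ⟨f, rfl⟩ : ∃ f', f = f' + 1 := ⟨f - 1, by omega⟩
    obtain ⟨g, rfl⟩ : ∃ g', g = g' + 1 := ⟨g - 1, by omega⟩
    simp only [pvGoA]
    by_cases hleaf : pvChild t n 1 = 0
    · simp [hleaf]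
    · simp only [hleaf, ite_false]
      obtain ⟨⟨hc1a, hc1b, hc2a, hc2b⟩, hv1, hv2⟩ := pvStep t n b h1 h2 hv hleaf
      rw [ih f g _ hc1a hc1b hv1 (by omega) (by omega),
          ih f g _ hc2a hc2b hv2 (by omega) (by omega)]

-- the fully-fuelled A-side value
def pvFull (t : List (List Int)) (n : Int) : List Int := pvGoA t t.length n

theorem pvFull_leaf (t : List (List Int)) (n : Int)
    (h1 : -(t.length : Int) ≤ n) (h2 : n < t.length) (hleaf : pvChild t n 1 = 0) :
    pvFull t n = [] := by
  have hj := pvPos_lt t n h1 h2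
  obtain ⟨l, hl⟩ : ∃ l, t.length = l + 1 := ⟨t.length - 1, by omega⟩
  unfold pvFull; rw [hl]; simp [pvGoA, hleaf]

-- one step of validity at full budget: children stay valid at full budget
theorem pvStepFull (t : List (List Int)) (n : Int)
    (h1 : -(t.length : Int) ≤ n) (h2 : n < t.length)
    (hv : pvOK t t.length (pvPos t n) = true) (hi : pvChild t n 1 ≠ 0) :
    ((-(t.length : Int) ≤ pvChild t n 1 ∧ pvChild t n 1 < t.length ∧
      -(t.length : Int) ≤ pvChild t n 2 ∧ pvChild t n 2 < t.length)) ∧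
    pvOK t t.length (pvPos t (pvChild t n 1)) = true ∧
    pvOK t t.length (pvPos t (pvChild t n 2)) = true := by
  have hj := pvPos_lt t n h1 h2
  obtain ⟨l, hl⟩ : ∃ l, t.length = l + 1 := ⟨t.length - 1, by omega⟩
  rw [hl] at hv
  obtain ⟨hb, hv1, hv2⟩ := pvStep t n l h1 h2 hv hi
  exact ⟨hb, pvOK_mono t l t.length _ hv1 (by omega), pvOK_mono t l t.length _ hv2 (by omega)⟩

theorem pvFull_internal (t : List (List Int)) (n : Int)
    (h1 : -(t.length : Int) ≤ n) (h2 : n < t.length)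
    (hv : pvOK t t.length (pvPos t n) = true) (hi : pvChild t n 1 ≠ 0) :
    pvFull t n = pvChild t n 1 :: (pvFull t (pvChild t n 1) ++ (pvChild t n 2 :: pvFull t (pvChild t n 2))) := by
  have hj := pvPos_lt t n h1 h2
  obtain ⟨l, hl⟩ : ∃ l, t.length = l + 1 := ⟨t.length - 1, by omega⟩
  have hv' := hv; rw [hl] at hv'
  obtain ⟨⟨hc1a, hc1b, hc2a, hc2b⟩, hv1, hv2⟩ := pvStep t n l h1 h2 hv' hi
  unfold pvFull
  conv_lhs => rw [hl]
  simp only [pvGoA, hi, ite_false]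
  rw [pvGoA_mono t l l t.length _ hc1a hc1b hv1 (by omega) (by omega),
      pvGoA_mono t l l t.length _ hc2a hc2b hv2 (by omega) (by omega)]

theorem pvGoA_len_bound (t : List (List Int)) : ∀ f n, (pvGoA t f n).length + 2 ≤ 2 ^ (f + 1) := by
  intro f
  induction f with
  | zero => intro n; simp [pvGoA]
  | succ f ih =>
    intro n
    simp only [pvGoA]
    by_cases hleaf : pvChild t n 1 = 0
    · simp only [hleaf, ite_true]
      have h := Nat.one_lt_two_pow (n := f + 1 + 1) (by omega)
      simp only [List.length_nil]
      omega
    · simp only [hleaf, ite_false]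
      have h1 := ih (pvChild t n 1)
      have h2 := ih (pvChild t n 2)
      simp only [List.length_cons, List.length_append]
      have : 2 ^ (f + 1 + 1) = 2 ^ (f + 1) + 2 ^ (f + 1) := by ring
      omega

theorem pvLoopB_nil (t : List (List Int)) (f : Nat) (first : Bool) (acc : List Int) :
    pvLoopB t f first acc [] = acc := by
  cases f <;> rfl

theorem pvLoopB_spec (t : List (List Int)) :
    ∀ f st acc,
      (∀ n ∈ st, -(t.length : Int) ≤ n ∧ n < (t.length : Int) ∧ pvOK t t.length (pvPos t n) = true) →
      (st.map (fun m => (pvFull t m).length + 1)).sum ≤ f →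
      pvLoopB t f false acc st = acc ++ st.flatMap (fun m => m :: pvFull t m) := by
  intro f
  induction f with
  | zero =>
    intro st acc hg hsum
    cases st with
    | nil => simp [pvLoopB]
    | cons n rest => simp at hsum
  | succ f ih =>
    intro st acc hg hsum
    cases st with
    | nil => simp [pvLoopB]
    | cons n rest =>
      obtain ⟨hn0, hn1, hnv⟩ := hg n (by simp)
      simp only [pvLoopB, Bool.false_eq_true, ite_false]
      by_cases hleaf : pvChild t n 1 = 0
      · simp only [hleaf, ite_true]
        have hfn : pvFull t n = [] := pvFull_leaf t n hn0 hn1 hleaf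
        rw [ih rest (acc ++ [n]) (fun m hm => hg m (by simp [hm]))
          (by simp only [List.map_cons, List.sum_cons, hfn] at hsum ⊢; omega)]
        simp [hfn]
      · simp only [hleaf, ite_false]
        obtain ⟨⟨hc1a, hc1b, hc2a, hc2b⟩, hv1, hv2⟩ := pvStepFull t n hn0 hn1 hnv hleaf
        have hfn := pvFull_internal t n hn0 hn1 hnv hleaf
        have hsum' : ((pvChild t n 1 :: pvChild t n 2 :: rest).map (fun m => (pvFull t m).length + 1)).sum ≤ f := by
          simp only [List.map_cons, List.sum_cons] at hsum ⊢
          rw [hfn] at hsum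
          simp only [List.length_cons, List.length_append] at hsum
          omega
        rw [ih (pvChild t n 1 :: pvChild t n 2 :: rest) (acc ++ [n])
          (by
            intro m hm
            simp only [List.mem_cons] at hm
            rcases hm with rfl | rfl | hm
            · exact ⟨hc1a, hc1b, hv1⟩
            · exact ⟨hc2a, hc2b, hv2⟩
            · exact hg m (by simp [hm])) hsum']
        simp only [List.flatMap_cons, hfn]
        simp

theorem pvMain (t : List (List Int)) (i : Int)
    (h1 : -(t.length : Int) ≤ i) (h2 : i < (t.length : Int))
    (hv : pvOK t t.length (pvPos t i) = true) :
    pvGoA t t.length i = pvLoopB t (2 ^ (t.length + 1)) true [] [i] := by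
  have hj := pvPos_lt t i h1 h2
  obtain ⟨F, hF⟩ : ∃ F, 2 ^ (t.length + 1) = F + 1 :=
    ⟨2 ^ (t.length + 1) - 1, by have := Nat.one_le_two_pow (n := t.length + 1); omega⟩
  rw [hF]
  by_cases hleaf : pvChild t i 1 = 0
  · simp only [pvLoopB, hleaf, ite_true]
    rw [pvLoopB_nil]
    exact pvFull_leaf t i h1 h2 hleaf
  · simp only [pvLoopB, hleaf, ite_false]
    obtain ⟨⟨hc1a, hc1b, hc2a, hc2b⟩, hv1, hv2⟩ := pvStepFull t i h1 h2 hv hleaf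
    rw [pvLoopB_spec t F [pvChild t i 1, pvChild t i 2] _
      (by
        intro m hm
        simp only [List.mem_cons] at hm
        rcases hm with rfl | rfl | hm
        · exact ⟨hc1a, hc1b, hv1⟩
        · exact ⟨hc2a, hc2b, hv2⟩
        · simp at hm)
      (by
        have hfn := pvFull_internal t i h1 h2 hv hleaf
        have b0 := pvGoA_len_bound t t.length i
        simp only [List.map_cons, List.map_nil, List.sum_cons, List.sum_nil]
        unfold pvFull at hfn ⊢
        rw [hfn] at b0
        simp only [List.length_cons, List.length_append] at b0
        omega)]
    show pvFull t i = _
    rw [pvFull_internal t i h1 h2 hv hleaf]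
    simp

-- ===== VERDICT (by name: the statement is the Claim_ definition above) =====
theorem get_children_indices_spec : Claim_equal_get_children_indices := by
  intro tree_struc node_index _ hpre
  unfold Spec_get_children_indices get_children_indices get_children_indices_alt
  exact pvMain tree_struc node_index hpre.1.1 hpre.1.2 hpre.2
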